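-- pv_equiv track=rewrite | github.com/sbhavani/dgx-spark-playbooks | scripts/converge_playbooks.py | shift_headings_down
-- ===== SOURCE A (Python) =====
-- def shift_headings_down(content: str) -> str:
--     """
--     Shift all markdown headings down one level
--
--     Args:
--         content: Markdown content with headings
--
--     Returns:
--         Content with headings shifted down one level
--     """
--     lines = content.split('\n')
--     shifted_lines = []
--
--     for line in lines:
--         # Check if line is a heading (starts with #)
--         if line.strip().startswith('#') and not line.strip().startswith('#!'):
--             # Add one more # to shift down
--             shifted_lines.append('#' + line)
--         else:
--             shifted_lines.append(line)
--
--     return '\n'.join(shifted_lines)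
-- ===== SOURCE B (Python) =====
-- def shift_headings_down(content: str) -> str:
--     """Shift all markdown headings down one level.
--
--     Single character-level pass: at each line start, peek past spaces/tabs/CR;
--     if the first real character is '#' not followed by '!', emit one extra '#',
--     then copy the line through its newline. No split/strip/join.
--     """
--     out = []
--     n = len(content)
--     i = 0
--     while True:
--         # peek: is this line a heading?
--         j = i
--         while j < n and content[j] in ' \t\r':
--             j += 1
--         if j < n and content[j] == '#' and not (j + 1 < n and content[j + 1] == '!'):
--             out.append('#')
--         # copy the line (through its '\n', if any)
--         k = content.find('\n', i)
--         if k == -1: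
--             out.append(content[i:])
--             break
--         out.append(content[i:k + 1])
--         i = k + 1
--     return ''.join(out)
-- ===== Notes on version B (the rewrite author's own statement) =====
-- stated objective: alternative
-- what changed: Replaced the split/per-line strip+startswith/join pipeline with a single character-level pass that peeks past horizontal whitespace at each line start to decide whether to insert an extra heading marker, then copies the line through its newline.
import Mathlib
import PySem

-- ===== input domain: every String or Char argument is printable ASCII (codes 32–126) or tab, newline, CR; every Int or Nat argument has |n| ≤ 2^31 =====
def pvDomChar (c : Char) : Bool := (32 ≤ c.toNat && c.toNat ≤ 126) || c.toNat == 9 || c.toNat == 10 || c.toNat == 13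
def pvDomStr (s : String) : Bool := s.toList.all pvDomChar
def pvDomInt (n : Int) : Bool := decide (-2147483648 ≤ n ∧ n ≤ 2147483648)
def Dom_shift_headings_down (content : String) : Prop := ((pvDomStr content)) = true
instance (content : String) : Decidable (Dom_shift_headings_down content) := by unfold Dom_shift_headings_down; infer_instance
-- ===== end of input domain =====

-- B replaces A's split/per-line strip+startswith/join pipeline by a single character-level pass over the content; alternative decomposition, same cost.


-- ===== PORT A =====
-- loop body of A: shift the line iff line.strip() starts with '#' but not with '#!'
def aLine (line : List Char) : List Char :=
  if PySem.Chars.startswith (PySem.Chars.strip line) ['#']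
      && !(PySem.Chars.startswith (PySem.Chars.strip line) ['#', '!'])
  then '#' :: line else line

def shift_headings_down (content : String) : String :=
  let lines := PySem.Chars.splitOn content.toList ['\n']
  let shifted := lines.foldl (fun acc line => acc ++ [aLine line]) ([] : List (List Char))
  String.mk (PySem.Chars.join ['\n'] shifted)

-- ===== PORT B =====
-- peek at a line start (Source B's inner while + '#'/'#!' test): the '#' to insert, if any
def bMark (cs : List Char) : List Char :=
  let r := cs.dropWhile (fun c => c == ' ' || c == '\t' || c == '\r')
  if r.head? == some '#' && !(r.tail.head? == some '!') then ['#'] else []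

-- Source B's outer while loop: emit the mark, copy the line through its '\n', continue
def bGo (cs : List Char) : List Char :=
  match h : cs.dropWhile (fun c => c ≠ '\n') with
  | [] => bMark cs ++ cs
  | _ :: tl => bMark cs ++ cs.takeWhile (fun c => c ≠ '\n') ++ '\n' :: bGo tl
termination_by cs.length
decreasing_by
  have h1 := List.length_dropWhile_le (fun c => decide (c ≠ '\n')) cs
  rw [h] at h1; simp at h1; omega

def shift_headings_down_alt (content : String) : String :=
  String.mk (bGo content.toList)

-- ===== PRECONDITION & SPEC =====
def Spec_shift_headings_down (content : String) (out : String) : Prop := out = shift_headings_down_alt content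
instance (content : String) (out : String) : Decidable (Spec_shift_headings_down content out) := by unfold Spec_shift_headings_down; infer_instance

-- ===== CLAIM (what is proved, stated in full; the proofs are below) =====
def Claim_equal_shift_headings_down : Prop := ∀ (content : String), Dom_shift_headings_down content → Spec_shift_headings_down content (shift_headings_down content)

-- ===== LEMMAS AND PROOFS =====

-- proof-side clean recursion computing content.split('\n')
def splitNl (cs : List Char) : List (List Char) :=
  match h : cs.dropWhile (fun c => c ≠ '\n') with
  | [] => [cs]
  | _ :: tl => cs.takeWhile (fun c => c ≠ '\n') :: splitNl tl
termination_by cs.length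
decreasing_by
  have h1 := List.length_dropWhile_le (fun c => decide (c ≠ '\n')) cs
  rw [h] at h1; simp at h1; omega

lemma go_zero (sep l cur : List Char) (acc : List (List Char)) :
    PySem.Chars.splitOn.go sep 0 l cur acc = ((cur.reverse ++ l) :: acc).reverse := rfl

lemma go_succ_nil (sep cur : List Char) (acc : List (List Char)) (f : Nat) :
    PySem.Chars.splitOn.go sep (f + 1) [] cur acc = (cur.reverse :: acc).reverse := by
  simp [PySem.Chars.splitOn.go]

def consHd (p : List Char) : List (List Char) → List (List Char)
  | [] => [p]
  | a :: as => (p ++ a) :: as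

lemma bGo_nil_case (cs : List Char) (h : cs.dropWhile (fun c => c ≠ '\n') = []) :
    bGo cs = bMark cs ++ cs := by
  rw [bGo]; split
  · rfl
  · rename_i heq; rw [h] at heq; exact absurd heq (by simp)

lemma bGo_cons (cs : List Char) (d : Char) (tl : List Char)
    (h : cs.dropWhile (fun c => c ≠ '\n') = d :: tl) :
    bGo cs = bMark cs ++ cs.takeWhile (fun c => c ≠ '\n') ++ '\n' :: bGo tl := by
  rw [bGo]; split
  · rename_i heq; rw [h] at heq; exact absurd heq (by simp)
  · rename_i x tl' heq; rw [h] at heq; cases heq; rfl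

lemma splitNl_nil_case (cs : List Char) (h : cs.dropWhile (fun c => c ≠ '\n') = []) :
    splitNl cs = [cs] := by
  rw [splitNl]; split
  · rfl
  · rename_i heq; rw [h] at heq; exact absurd heq (by simp)

lemma splitNl_cons (cs : List Char) (d : Char) (tl : List Char)
    (h : cs.dropWhile (fun c => c ≠ '\n') = d :: tl) :
    splitNl cs = cs.takeWhile (fun c => c ≠ '\n') :: splitNl tl := by
  rw [splitNl]; split
  · rename_i heq; rw [h] at heq; exact absurd heq (by simp)
  · rename_i x tl' heq; rw [h] at heq; cases heq; rfl

lemma splitNl_ne_nil (cs : List Char) : splitNl cs ≠ [] := by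
  rw [splitNl]; split <;> simp

lemma go_spec (l : List Char) : ∀ (fuel : Nat) (cur : List Char) (acc : List (List Char)),
    l.length ≤ fuel →
    PySem.Chars.splitOn.go ['\n'] fuel l cur acc = acc.reverse ++ consHd cur.reverse (splitNl l) := by
  induction l with
  | nil =>
    intro fuel cur acc _
    rw [splitNl_nil_case [] (by simp)]
    cases fuel with
    | zero => rw [go_zero]; simp [consHd]
    | succ f => rw [go_succ_nil]; simp [consHd]
  | cons c rest ih =>
    intro fuel cur acc hlen
    cases fuel with
    | zero => simp at hlen
    | succ f =>
      rw [show PySem.Chars.splitOn.go ['\n'] (f+1) (c :: rest) cur acc =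
          if ['\n'].isPrefixOf (c :: rest) then
            PySem.Chars.splitOn.go ['\n'] f (List.drop (List.length ['\n']) (c :: rest)) [] (cur.reverse :: acc)
          else PySem.Chars.splitOn.go ['\n'] f rest (c :: cur) acc
        from by simp [PySem.Chars.splitOn.go]]
      by_cases hc : c = '\n'
      · subst hc
        rw [if_pos (show (['\n'] : List Char).isPrefixOf ('\n' :: rest) = true from rfl)]
        rw [show List.drop (['\n'] : List Char).length ('\n' :: rest) = rest from rfl]
        rw [ih f [] (cur.reverse :: acc) (by simpa using Nat.lt_succ_iff.mp (by simpa using hlen))]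
        rw [splitNl_cons ('\n' :: rest) '\n' rest (by simp)]
        simp [consHd]
        cases hsp : splitNl rest with
        | nil => exact absurd hsp (splitNl_ne_nil rest)
        | cons a as => simp [consHd]
      · rw [if_neg (by simp [List.isPrefixOf]; exact fun h => hc h.symm)]
        rw [ih f (c :: cur) acc (by simpa using Nat.lt_succ_iff.mp (by simpa using hlen))]
        have hstep : List.dropWhile (fun x => decide (x ≠ '\n')) (c :: rest)
            = List.dropWhile (fun x => decide (x ≠ '\n')) rest := by
          rw [List.dropWhile_cons, if_pos (by simpa using hc)]
        cases hdw : rest.dropWhile (fun x => x ≠ '\n') with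
        | nil =>
          rw [splitNl_nil_case (c :: rest) (by rw [hstep, hdw])]
          rw [splitNl_nil_case rest hdw]
          simp [consHd]
        | cons d tl =>
          rw [splitNl_cons (c :: rest) d tl (by rw [hstep, hdw])]
          rw [splitNl_cons rest d tl hdw]
          simp [consHd, List.takeWhile_cons, hc]

lemma splitOn_eq_splitNl (cs : List Char) : PySem.Chars.splitOn cs ['\n'] = splitNl cs := by
  rw [PySem.Chars.splitOn, go_spec cs (cs.length + 1) [] [] (by omega)]
  cases h : splitNl cs with
  | nil => exact absurd h (splitNl_ne_nil cs)
  | cons a as => simp [consHd]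

lemma charToNat_inj (a b : Char) : a.toNat = b.toNat ↔ a = b := eq_iff_eq_of_cmp_eq_cmp rfl

lemma isspace_eq (c : Char) (hd : pvDomChar c = true) (hn : c ≠ '\n') :
    PySem.Chars.isspace c = (c == ' ' || c == '\t' || c == '\r') := by
  have h10 : c.toNat ≠ 10 := fun h => hn ((charToNat_inj c '\n').mp (by simpa using h))
  simp only [pvDomChar, Bool.or_eq_true, Bool.and_eq_true, decide_eq_true_eq, beq_iff_eq] at hd
  rw [Bool.eq_iff_iff]
  simp only [PySem.Chars.isspace, Bool.or_eq_true, Bool.and_eq_true, decide_eq_true_eq,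
    beq_iff_eq, ← charToNat_inj]
  have h32 : (' ' : Char).toNat = 32 := by decide
  have h9 : ('\t' : Char).toNat = 9 := by decide
  have h13 : ('\r' : Char).toNat = 13 := by decide
  rw [h32, h9, h13]
  omega

-- generic helpers (no matching library lemma found)
lemma dropWhile_congr_mem {α : Type} (p q : α → Bool) (l : List α)
    (h : ∀ c ∈ l, p c = q c) : l.dropWhile p = l.dropWhile q := by
  induction l with
  | nil => rfl
  | cons a as ih =>
    simp only [List.dropWhile_cons]
    rw [h a (by simp)]
    split
    · exact ih (fun c hc => h c (by simp [hc]))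
    · rfl

lemma dropWhile_head_false {α : Type} (p : α → Bool) (l : List α) (c : α) (t : List α)
    (h : l.dropWhile p = c :: t) : p c = false := by
  induction l with
  | nil => simp at h
  | cons a as ih =>
    rw [List.dropWhile_cons] at h
    split at h
    · exact ih h
    · cases h; rename_i hp; simpa using hp

lemma rstrip_cons (c : Char) (t : List Char) (h : PySem.Chars.isspace c = false) :
    PySem.Chars.rstrip (c :: t) = c :: PySem.Chars.rstrip t := by
  have hrev : (c :: t).reverse = t.reverse ++ [c] := by simp
  rw [PySem.Chars.rstrip, PySem.Chars.rstrip, hrev, List.dropWhile_append]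
  by_cases he : (List.dropWhile PySem.Chars.isspace t.reverse).isEmpty
  · rw [if_pos he]
    rw [List.isEmpty_iff] at he
    rw [he]
    simp [List.dropWhile_cons, h]
  · rw [if_neg he]
    simp

lemma rstrip_prefix (t : List Char) : PySem.Chars.rstrip t <+: t := by
  have h : List.dropWhile PySem.Chars.isspace t.reverse <:+ t.reverse :=
    List.dropWhile_suffix _
  have h2 := List.reverse_prefix.mpr h
  simpa [PySem.Chars.rstrip] using h2

lemma head_bang_iff (t : List Char) :
    ((PySem.Chars.rstrip t).head? = some '!') ↔ (t.head? = some '!') := by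
  constructor
  · intro h
    obtain ⟨s, hs⟩ := rstrip_prefix t
    cases hr : PySem.Chars.rstrip t with
    | nil => rw [hr] at h; simp at h
    | cons x u =>
      rw [hr] at h hs
      simp at h; subst h
      rw [← hs]; rfl
  · intro h
    cases t with
    | nil => simp at h
    | cons x u =>
      simp at h; subst h
      rw [rstrip_cons '!' u (by decide)]; rfl

-- the per-line fact: A's shifted line is B's mark followed by the line
lemma aLine_eq (line : List Char) (hd : ∀ c ∈ line, pvDomChar c = true)
    (hn : ∀ c ∈ line, c ≠ '\n') : aLine line = bMark line ++ line := by
  have hcong : line.dropWhile PySem.Chars.isspace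
      = line.dropWhile (fun c => c == ' ' || c == '\t' || c == '\r') :=
    dropWhile_congr_mem _ _ line (fun c hc => isspace_eq c (hd c hc) (hn c hc))
  rw [aLine, bMark]
  simp only [PySem.Chars.strip, PySem.Chars.lstrip, hcong]
  cases hL : line.dropWhile (fun c => c == ' ' || c == '\t' || c == '\r') with
  | nil =>
    simp [PySem.Chars.rstrip, PySem.Chars.startswith, List.isPrefixOf]
  | cons c t =>
    have hmem : c ∈ line ∧ ∀ x ∈ t, x ∈ line := by
      have hsuf : c :: t <:+ line := hL ▸ List.dropWhile_suffix _
      exact ⟨hsuf.subset (by simp), fun x hx => hsuf.subset (by simp [hx])⟩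
    have hwsb : (c == ' ' || c == '\t' || c == '\r') = false :=
      dropWhile_head_false _ line c t hL
    have hcsp : PySem.Chars.isspace c = false := by
      rw [isspace_eq c (hd c hmem.1) (hn c hmem.1)]; exact hwsb
    rw [rstrip_cons c t hcsp]
    by_cases hc : c = '#'
    · subst hc
      have hsw1 : PySem.Chars.startswith ('#' :: PySem.Chars.rstrip t) ['#'] = true := by
        simp [PySem.Chars.startswith, List.isPrefixOf]
      have hsw2 : PySem.Chars.startswith ('#' :: PySem.Chars.rstrip t) ['#', '!']
          = ((PySem.Chars.rstrip t).head? == some '!') := by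
        cases hrt : PySem.Chars.rstrip t with
        | nil => simp [PySem.Chars.startswith, List.isPrefixOf]
        | cons y u => simp [PySem.Chars.startswith, List.isPrefixOf, eq_comm]
      rw [hsw1, hsw2]
      have hbang : ((PySem.Chars.rstrip t).head? == some '!') = (t.head? == some '!') := by
        rw [Bool.eq_iff_iff]; simp only [beq_iff_eq]; exact head_bang_iff t
      rw [hbang]
      by_cases hb : (t.head? == some '!') = true <;> simp [hb]
    · have hb1 : (('#' : Char) == c) = false := beq_eq_false_iff_ne.mpr (Ne.symm hc)
      have hb2 : (c == ('#' : Char)) = false := beq_eq_false_iff_ne.mpr hc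
      simp [PySem.Chars.startswith, List.isPrefixOf, hb1, hb2]

lemma bMark_append_nl (line tl : List Char) (hn : ∀ c ∈ line, c ≠ '\n') :
    bMark (line ++ '\n' :: tl) = bMark line := by
  rw [bMark, bMark]
  simp only [List.dropWhile_append]
  by_cases he : (line.dropWhile (fun c => c == ' ' || c == '\t' || c == '\r')).isEmpty
  · rw [if_pos he]
    rw [List.isEmpty_iff] at he
    rw [he]
    simp [List.dropWhile_cons]
  · rw [if_neg he]
    rw [List.isEmpty_iff] at he
    cases hL : line.dropWhile (fun c => c == ' ' || c == '\t' || c == '\r') with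
    | nil => exact absurd hL he
    | cons c t =>
      cases t <;> simp

lemma main_lemma (n : Nat) : ∀ (cs : List Char), cs.length ≤ n → (∀ c ∈ cs, pvDomChar c = true) →
    PySem.Chars.join ['\n'] ((splitNl cs).map aLine) = bGo cs := by
  induction n with
  | zero =>
    intro cs hlen hdom
    have : cs = [] := by cases cs <;> simp_all
    subst this
    rw [splitNl_nil_case [] (by simp), bGo_nil_case [] (by simp)]
    simp [PySem.Chars.join_singleton, aLine, PySem.Chars.strip, PySem.Chars.lstrip,
      PySem.Chars.rstrip, PySem.Chars.startswith, List.isPrefixOf, bMark]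
  | succ n ih =>
    intro cs hlen hdom
    cases hdw : cs.dropWhile (fun c => c ≠ '\n') with
    | nil =>
      rw [splitNl_nil_case cs hdw, bGo_nil_case cs hdw]
      have hn : ∀ c ∈ cs, c ≠ '\n' := by
        simp only [List.dropWhile_eq_nil_iff] at hdw
        intro c hc
        simpa using hdw c hc
      rw [List.map_singleton, PySem.Chars.join_singleton, aLine_eq cs hdom hn]
    | cons d tl =>
      have hd' : d = '\n' := by
        have := dropWhile_head_false _ cs d tl hdw
        simpa using this
      subst hd'
      have hcs : cs.takeWhile (fun c => c ≠ '\n') ++ '\n' :: tl = cs := by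
        conv_rhs => rw [← List.takeWhile_append_dropWhile (p := fun c => decide (c ≠ '\n')) (l := cs)]
        rw [hdw]
      have htl_len : tl.length ≤ n := by
        have := congrArg List.length hcs
        simp at this
        omega
      have htl_dom : ∀ c ∈ tl, pvDomChar c = true := by
        intro c hc
        exact hdom c (by rw [← hcs]; exact List.mem_append_right _ (List.mem_cons_of_mem _ hc))
      have hpre_dom : ∀ c ∈ cs.takeWhile (fun c => c ≠ '\n'), pvDomChar c = true := by
        intro c hc
        exact hdom c ((List.takeWhile_sublist _).subset hc)
      have hpre_nl : ∀ c ∈ cs.takeWhile (fun c => c ≠ '\n'), c ≠ '\n' := by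
        intro c hc
        have := List.mem_takeWhile_imp hc
        simpa using this
      rw [splitNl_cons cs '\n' tl hdw, bGo_cons cs '\n' tl hdw]
      rw [List.map_cons]
      cases hsp : (splitNl tl).map aLine with
      | nil => exact absurd (List.map_eq_nil_iff.mp hsp) (splitNl_ne_nil tl)
      | cons q qs =>
        rw [PySem.Chars.join_cons_cons]
        rw [← hsp, ih tl htl_len htl_dom]
        rw [aLine_eq _ hpre_dom hpre_nl]
        have hbm : bMark cs = bMark (cs.takeWhile (fun c => c ≠ '\n')) := by
          conv_lhs => rw [← hcs]
          exact bMark_append_nl _ tl hpre_nl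
        rw [hbm]
        simp [List.append_assoc]

-- ===== VERDICT (by name: the statement is the Claim_ definition above) =====
theorem shift_headings_down_spec : Claim_equal_shift_headings_down := by
  intro content hdom
  unfold Spec_shift_headings_down shift_headings_down shift_headings_down_alt
  simp only [splitOn_eq_splitNl]
  rw [PySem.List.foldl_append_singleton_eq_map, List.nil_append]
  have hdom' : ∀ c ∈ content.toList, pvDomChar c = true := by
    have : pvDomStr content = true := hdom
    rw [pvDomStr, List.all_eq_true] at this
    intro c hc; simpa using this c hc
  rw [main_lemma content.toList.length content.toList le_rfl hdom']
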